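-- pv_equiv track=rewrite | github.com/allaunthefox/NoDupeLabs | scripts/fix_test_lints.py | fix_blank_lines_before_functions
-- ===== SOURCE A (Python) =====
-- def fix_blank_lines_before_functions(content):
--     """Ensure 2 blank lines before top-level functions/classes."""
--     lines = content.split('\n')
--     result = []
--     i = 0
--     while i < len(lines):
--         line = lines[i]
--         # Check if this is a function or class definition at module level
--         if (line.startswith('def ') or line.startswith('class ')) and i > 0:
--             # Count blank lines before this line
--             blank_count = 0
--             j = i - 1
--             while j >= 0 and lines[j].strip() == '':
--                 blank_count += 1
--                 j -= 1
--
--             # If previous non-blank line is import or another def/class, need 2 blanks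
--             if j >= 0 and not lines[j].startswith(('import ', 'from ')):
--                 if blank_count < 2:
--                     # Remove existing blanks and add 2
--                     while result and result[-1].strip() == '':
--                         result.pop()
--                     result.append('')
--                     result.append('')
--         result.append(line)
--         i += 1
--     return '\n'.join(result)
-- ===== SOURCE B (Python) =====
-- def fix_blank_lines_before_functions(content):
--     """Ensure 2 blank lines before top-level functions/classes."""
--     out = []
--     pending = []   # blank lines buffered since the last non-blank line
--     last = None    # the last non-blank line seen
--     for line in content.split('\n'):
--         if line.strip() == '':
--             pending.append(line)
--         elif ((line.startswith('def ') or line.startswith('class '))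
--               and last is not None
--               and not last.startswith(('import ', 'from '))
--               and len(pending) < 2):
--             out.extend(('', '', line))
--             pending = []
--             last = line
--         else:
--             out.extend(pending)
--             out.append(line)
--             pending = []
--             last = line
--     out.extend(pending)
--     return '\n'.join(out)
-- ===== Notes on version B (the rewrite author's own statement) =====
-- stated objective: alternative
-- what changed: Replaced A's indexed while-loop with a backward re-scan of earlier lines and a pop-while on the result by a single forward pass that buffers pending blank lines and remembers the last non-blank line, so no backward scan and no popping ever happens.
import Mathlib
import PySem

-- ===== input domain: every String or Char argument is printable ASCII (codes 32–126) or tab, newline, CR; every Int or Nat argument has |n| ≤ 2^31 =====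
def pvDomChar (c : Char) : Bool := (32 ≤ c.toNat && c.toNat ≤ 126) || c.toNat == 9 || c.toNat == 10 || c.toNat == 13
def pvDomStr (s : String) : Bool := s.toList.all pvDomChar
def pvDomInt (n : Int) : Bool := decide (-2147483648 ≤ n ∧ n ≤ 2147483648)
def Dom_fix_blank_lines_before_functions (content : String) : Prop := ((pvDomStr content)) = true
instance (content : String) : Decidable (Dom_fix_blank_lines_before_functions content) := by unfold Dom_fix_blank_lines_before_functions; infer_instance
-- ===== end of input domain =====

-- B replaces A's per-def backward blank-line scan and result-popping by a single forward
-- pass that buffers pending blank lines and remembers the last non-blank line.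

-- ===== PORT A =====
-- shared line predicates (line.strip() == '', startswith tests of both Pythons)
def pvBlank (l : String) : Bool := PySem.Str.strip l == ""

def pvIsDef (l : String) : Bool := PySem.Str.startswith l "def " || PySem.Str.startswith l "class "


def pvIsImport (l : String) : Bool := PySem.Str.startswith l "import " || PySem.Str.startswith l "from "


def pvPrevScan (lines : List String) : Nat → Nat × Option String
  | 0 => (0, none)
  | k + 1 =>
    let l := lines.getD k ""
    if pvBlank l then
      let r := pvPrevScan lines k
      (r.1 + 1, r.2)
    else (0, some l)

-- the body of A's def/class branch: compute result1 from result at index i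

def pvPopBlanks (res : List String) : List String := (res.reverse.dropWhile pvBlank).reverse


def pvAStep (lines : List String) (i : Nat) (line : String) (result : List String) : List String :=
  if pvIsDef line && decide (0 < i) then
    match pvPrevScan lines i with
    | (bc, some p) =>
      if !pvIsImport p && decide (bc < 2) then pvPopBlanks result ++ ["", ""] else result
    | (_, none) => result
  else result


def pvALoop (lines : List String) (i : Nat) (result : List String) : List String :=
  if h : i < lines.length then
    let line := lines[i]
    pvALoop lines (i + 1) (pvAStep lines i line result ++ [line])
  else result
  termination_by lines.length - i


def pvBLoop : List String → List String → List String → Option String → List String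
  | [], out, pending, _ => out ++ pending
  | l :: rest, out, pending, last =>
    if pvBlank l then pvBLoop rest out (pending ++ [l]) last
    else if pvIsDef l &&
        (match last with
         | some p => !pvIsImport p && decide (pending.length < 2)
         | none => false) then
      pvBLoop rest (out ++ ["", "", l]) [] (some l)
    else pvBLoop rest (out ++ pending ++ [l]) [] (some l)


def fix_blank_lines_before_functions (content : String) : String :=
  -- content.split('\n'): the separator is non-empty, so split? is always some
  let lines := (PySem.Str.split? content "\n").getD []
  PySem.Str.join "\n" (pvALoop lines 0 [])

-- ===== PORT B =====
def fix_blank_lines_before_functions_alt (content : String) : String :=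
  let lines := (PySem.Str.split? content "\n").getD []
  PySem.Str.join "\n" (pvBLoop lines [] [] none)

-- ===== PRECONDITION & SPEC =====
def Spec_fix_blank_lines_before_functions (content : String) (out : String) : Prop := out = fix_blank_lines_before_functions_alt content
instance (content : String) (out : String) : Decidable (Spec_fix_blank_lines_before_functions content out) := by unfold Spec_fix_blank_lines_before_functions; infer_instance

-- ===== CLAIM (what is proved, stated in full; the proofs are below) =====
def Claim_equal_fix_blank_lines_before_functions : Prop := ∀ (content : String), Dom_fix_blank_lines_before_functions content → Spec_fix_blank_lines_before_functions content (fix_blank_lines_before_functions content)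

-- ===== LEMMAS AND PROOFS =====
lemma pvStrip_cons_ne (c : Char) (cs : List Char) (hc : PySem.Chars.isspace c = false) :
    PySem.Chars.strip (c :: cs) ≠ [] := by
  simp only [PySem.Chars.strip, PySem.Chars.lstrip, PySem.Chars.rstrip, List.dropWhile_cons, hc,
    Bool.false_eq_true, if_false]
  intro h
  rw [List.reverse_eq_nil_iff, List.dropWhile_eq_nil_iff] at h
  have := h c (by simp)
  simp [hc] at this


lemma pvIsDef_blank (l : String) (h : pvIsDef l = true) : pvBlank l = false := by
  unfold pvIsDef at h
  unfold pvBlank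
  rw [beq_eq_false_iff_ne]
  intro he
  have he' : PySem.Chars.strip l.toList = [] := by
    have := congrArg String.toList he
    simpa [PySem.Str.toList_strip] using this
  rcases Bool.or_eq_true_iff.1 h with h' | h' <;>
  · rw [PySem.Str.startswith_eq, PySem.Chars.startswith_iff] at h'
    obtain ⟨t, ht⟩ := h'
    rw [← ht] at he'
    exact pvStrip_cons_ne _ _ (by decide) he'

lemma pvPopBlanks_concat (xs : List String) (l : String) (h : pvBlank l = false) :
    pvPopBlanks (xs ++ [l]) = xs ++ [l] := by
  simp [pvPopBlanks, h]


lemma pvPopBlanks_append_blanks (xs pending : List String)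
    (h : ∀ l ∈ pending, pvBlank l = true) :
    pvPopBlanks (xs ++ pending) = pvPopBlanks xs := by
  unfold pvPopBlanks
  rw [List.reverse_append, List.dropWhile_append]
  have hnil : pending.reverse.dropWhile pvBlank = [] :=
    List.dropWhile_eq_nil_iff.2 (fun x hx => h x (List.mem_reverse.1 hx))
  simp [hnil]

lemma pvAStep_notdef (lines : List String) (i : Nat) (line : String) (result : List String)
    (h : (pvIsDef line && decide (0 < i)) = false) :
    pvAStep lines i line result = result := by
  unfold pvAStep; rw [h]; rfl


lemma pvAStep_none (lines : List String) (i : Nat) (line : String) (result : List String)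
    (n : Nat) (h : pvPrevScan lines i = (n, none)) :
    pvAStep lines i line result = result := by
  unfold pvAStep; rw [h]; split <;> rfl


lemma pvAStep_insert (lines : List String) (i : Nat) (line : String) (result : List String)
    (n : Nat) (p : String) (hc : (pvIsDef line && decide (0 < i)) = true)
    (h : pvPrevScan lines i = (n, some p))
    (hins : (!pvIsImport p && decide (n < 2)) = true) :
    pvAStep lines i line result = pvPopBlanks result ++ ["", ""] := by
  unfold pvAStep; rw [hc, h]; simp only [if_true]; rw [hins]; rfl


lemma pvAStep_noins (lines : List String) (i : Nat) (line : String) (result : List String)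
    (n : Nat) (p : String) (h : pvPrevScan lines i = (n, some p))
    (hins : (!pvIsImport p && decide (n < 2)) = false) :
    pvAStep lines i line result = result := by
  unfold pvAStep; rw [h]; split
  · exact if_neg (by rw [hins]; exact Bool.false_ne_true)
  · rfl


lemma pvLoop_eq : ∀ (rest lines : List String) (i : Nat) (out pending : List String)
    (last : Option String),
    rest = lines.drop i →
    pvPrevScan lines i = (pending.length, last) →
    (∀ l ∈ pending, pvBlank l = true) →
    pvPopBlanks out = out →
    pvALoop lines i (out ++ pending) = pvBLoop rest out pending last := by
  intro rest
  induction rest with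
  | nil =>
    intro lines i out pending last hrest hscan hpend hout
    have hle : lines.length ≤ i := List.drop_eq_nil_iff.1 hrest.symm
    rw [pvALoop]
    simp [Nat.not_lt.2 hle, pvBLoop]
  | cons l rest' ih =>
    intro lines i out pending last hrest hscan hpend hout
    have hi : i < lines.length := by
      by_contra hc
      rw [List.drop_eq_nil_iff.2 (Nat.le_of_not_lt hc)] at hrest
      simp at hrest
    have hdrop := List.drop_eq_getElem_cons hi
    rw [hdrop] at hrest
    obtain ⟨hl, hrest'⟩ : lines[i] = l ∧ rest' = lines.drop (i + 1) := by
      injection hrest.symm with a b; exact ⟨a, b.symm⟩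
    have hscan' : pvPrevScan lines (i + 1) =
        (if pvBlank l then (pending.length + 1, last) else (0, some l)) := by
      rw [pvPrevScan]
      simp only [List.getD_eq_getElem lines "" hi, hl, hscan]
    rw [pvALoop]
    simp only [hi, dif_pos, hl]
    by_cases hb : pvBlank l = true
    · -- blank line: A appends it, B buffers it
      have hd : pvIsDef l = false := by
        cases h' : pvIsDef l
        · rfl
        · rw [pvIsDef_blank l h'] at hb; exact absurd hb (by simp)
      rw [pvAStep_notdef lines i l _ (by rw [hd]; rfl)]
      have hnext := ih lines (i + 1) out (pending ++ [l]) last hrest' (by simp [hscan', hb])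
        (by intro x hx
            rcases List.mem_append.1 hx with h | h
            · exact hpend x h
            · simp at h; subst h; exact hb) hout
      rw [List.append_assoc] at *
      rw [hnext]
      simp only [pvBLoop, hb, if_pos]
    · -- non-blank line
      have hb' : pvBlank l = false := Bool.eq_false_iff.2 hb
      have hscan'' : pvPrevScan lines (i + 1) = (0, some l) := by simp [hscan', hb']
      have hnext := ih lines (i + 1) (out ++ pending ++ [l]) [] (some l) hrest' hscan''
        (by intro x hx; simp at hx)
        (pvPopBlanks_concat (out ++ pending) l hb')
      simp only [List.append_nil] at hnext
      simp only [pvBLoop, hb', Bool.false_eq_true, if_false]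
      cases last with
      | none =>
        -- no previous non-blank line: B's condition is false; A's match hits none
        rw [pvAStep_none lines i l _ pending.length hscan]
        rw [hnext]
        simp only [Bool.and_false, Bool.false_eq_true, if_false]
      | some p =>
        have hi0 : 0 < i := by
          rcases Nat.eq_zero_or_pos i with h0 | h0
          · subst h0; rw [pvPrevScan] at hscan; simp at hscan
          · exact h0
        by_cases hdef : pvIsDef l = true
        · have hc : (pvIsDef l && decide (0 < i)) = true := by simp [hdef, hi0]
          by_cases hins : (!pvIsImport p && decide (pending.length < 2)) = true
          · -- insertion: A pops the pending blanks it just counted, B drops its buffer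
            have hpop : pvPopBlanks (out ++ pending) = out := by
              rw [pvPopBlanks_append_blanks out pending hpend, hout]
            have hnext2 := ih lines (i + 1) (out ++ ["", "", l]) [] (some l) hrest' hscan''
              (by intro x hx; simp at hx)
              (by have h3 : out ++ ["", "", l] = (out ++ ["", ""]) ++ [l] := by simp
                  rw [h3]; exact pvPopBlanks_concat _ _ hb')
            simp only [List.append_nil] at hnext2
            rw [pvAStep_insert lines i l _ pending.length p hc hscan hins, hpop]
            rw [show (out ++ ["", ""]) ++ [l] = out ++ ["", "", l] from by simp]
            rw [hnext2]
            simp only [hdef, Bool.true_and, hins, if_pos]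
          · have hins' : (!pvIsImport p && decide (pending.length < 2)) = false :=
              Bool.eq_false_iff.2 hins
            rw [pvAStep_noins lines i l _ pending.length p hscan hins']
            rw [hnext]
            simp only [hdef, Bool.true_and, hins', Bool.false_eq_true, if_false]
        · have hdef' : pvIsDef l = false := Bool.eq_false_iff.2 hdef
          rw [pvAStep_notdef lines i l _ (by rw [hdef']; rfl)]
          rw [hnext]
          simp only [hdef', Bool.false_and, Bool.false_eq_true, if_false]

-- ===== VERDICT (by name: the statement is the Claim_ definition above) =====
theorem fix_blank_lines_before_functions_spec : Claim_equal_fix_blank_lines_before_functions := by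
  intro content _
  unfold Spec_fix_blank_lines_before_functions fix_blank_lines_before_functions fix_blank_lines_before_functions_alt
  have h := pvLoop_eq ((PySem.Str.split? content "\n").getD []) ((PySem.Str.split? content "\n").getD [])
    0 [] [] none rfl rfl (by simp) rfl
  simpa using congrArg (PySem.Str.join "\n") h
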